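-- pv_equiv track=rewrite | github.com/rtp1996/Tarea-PIA | procesado_lista.py | procesar_lista
-- ===== SOURCE A (Python) =====
-- def procesar_lista(lista_enteros):
--     # 1. Elimina los números negativos
--     lista_sin_negativos = [num for num in lista_enteros if num >= 0]
--
--     # 2. Elimina números duplicados
--     lista_sin_duplicados = []
--     for elemento in lista_sin_negativos:
--         if elemento not in lista_sin_duplicados:
--             lista_sin_duplicados.append(elemento)
--     # 3. Ordena la lista de menor a mayor
--     lista_sin_duplicados.sort()
--     return lista_sin_duplicados
-- ===== SOURCE B (Python) =====
-- def procesar_lista(lista_enteros):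
--     ordenados = sorted(num for num in lista_enteros if num >= 0)
--     resultado = []
--     prev = None
--     for num in ordenados:
--         if num != prev:
--             resultado.append(num)
--             prev = num
--     return resultado
-- ===== Notes on version B (the rewrite author's own statement) =====
-- stated objective: faster
-- what changed: A dedupes before sorting with an O(n^2) membership scan over the growing result list; B sorts the non-negative values first and removes duplicates in one linear pass comparing each element to the previous kept one.
import Mathlib
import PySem

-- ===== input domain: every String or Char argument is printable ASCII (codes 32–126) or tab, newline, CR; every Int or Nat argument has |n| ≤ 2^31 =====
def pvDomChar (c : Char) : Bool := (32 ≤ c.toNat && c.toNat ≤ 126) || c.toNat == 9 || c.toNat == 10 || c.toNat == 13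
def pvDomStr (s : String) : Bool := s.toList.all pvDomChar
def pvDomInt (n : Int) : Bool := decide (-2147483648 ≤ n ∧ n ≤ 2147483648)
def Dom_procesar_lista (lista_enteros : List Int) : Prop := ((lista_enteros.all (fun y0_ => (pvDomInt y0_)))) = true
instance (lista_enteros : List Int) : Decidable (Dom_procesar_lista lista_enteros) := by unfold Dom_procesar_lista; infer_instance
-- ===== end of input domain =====

-- B sorts the non-negative values first and dedupes in one linear pass (vs A's O(n^2) membership-scan dedupe before sorting).

-- ===== PORT A =====
def procesar_lista (lista_enteros : List Int) : List Int :=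
  let lista_sin_negativos := lista_enteros.filter (fun num => decide (num ≥ 0))
  let lista_sin_duplicados :=
    lista_sin_negativos.foldl
      (fun acc elemento => if elemento ∉ acc then acc ++ [elemento] else acc) []
  PySem.List.sorted lista_sin_duplicados (fun x => x) false

-- ===== PORT B =====
def procesar_lista_alt (lista_enteros : List Int) : List Int :=
  let ordenados :=
    PySem.List.sorted (lista_enteros.filter (fun num => decide (num ≥ 0))) (fun x => x) false
  (ordenados.foldl
    (fun (st : List Int × Option Int) num =>
      if (some num : Option Int) ≠ st.2 then (st.1 ++ [num], some num) else st)
    ([], none)).1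

-- ===== PRECONDITION & SPEC =====
def Spec_procesar_lista (lista_enteros : List Int) (out : List Int) : Prop := out = procesar_lista_alt lista_enteros
instance (lista_enteros : List Int) (out : List Int) : Decidable (Spec_procesar_lista lista_enteros out) := by unfold Spec_procesar_lista; infer_instance

-- ===== CLAIM (what is proved, stated in full; the proofs are below) =====
def Claim_equal_procesar_lista : Prop := ∀ (lista_enteros : List Int), Dom_procesar_lista lista_enteros → Spec_procesar_lista lista_enteros (procesar_lista lista_enteros)

-- ===== LEMMAS AND PROOFS =====

-- B's fold step
def pvStep : List Int × Option Int → Int → List Int × Option Int :=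
  fun st num => if (some num : Option Int) ≠ st.2 then (st.1 ++ [num], some num) else st

-- adjacent-dedupe as a structural recursion (spec of B's fold)
def pvAdj : Option Int → List Int → List Int
  | _, [] => []
  | p, x :: xs => if (some x : Option Int) ≠ p then x :: pvAdj (some x) xs else pvAdj p xs

def pvFin : Option Int → List Int → Option Int
  | p, [] => p
  | p, x :: xs => if (some x : Option Int) ≠ p then pvFin (some x) xs else pvFin p xs

lemma pvFold_eq (S : List Int) : ∀ (acc : List Int) (p : Option Int),
    S.foldl pvStep (acc, p) = (acc ++ pvAdj p S, pvFin p S) := by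
  induction S with
  | nil => intro acc p; simp [pvAdj, pvFin]
  | cons x xs ih =>
    intro acc p
    by_cases h : (some x : Option Int) ≠ p
    · simp [List.foldl, pvStep, pvAdj, pvFin, h, ih]
    · simp [List.foldl, pvStep, pvAdj, pvFin, h, ih]

-- pvAdj on a ≤-sorted list with p a lower bound: strictly increasing, members = S minus p
lemma pvAdj_some (S : List Int) : ∀ (v : Int), S.Pairwise (· ≤ ·) → (∀ x ∈ S, v ≤ x) →
    (pvAdj (some v) S).Pairwise (· < ·) ∧ (∀ y ∈ pvAdj (some v) S, v < y) ∧
    (∀ y, y ∈ pvAdj (some v) S ↔ y ∈ S ∧ y ≠ v) := by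
  induction S with
  | nil => intro v _ _; simp [pvAdj]
  | cons x xs ih =>
    intro v hs hv
    have hx : v ≤ x := hv x (by simp)
    have hxs : xs.Pairwise (· ≤ ·) := (List.pairwise_cons.mp hs).2
    have hxb : ∀ y ∈ xs, x ≤ y := (List.pairwise_cons.mp hs).1
    by_cases h : x = v
    · subst h
      have := ih x hxs hxb
      have hadj : pvAdj (some x) (x :: xs) = pvAdj (some x) xs := by simp [pvAdj]
      rw [hadj]
      refine ⟨this.1, this.2.1, fun y => ?_⟩
      rw [this.2.2 y]
      constructor
      · rintro ⟨hy, hne⟩; exact ⟨List.mem_cons.mpr (Or.inr hy), hne⟩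
      · rintro ⟨hy, hne⟩
        rcases List.mem_cons.mp hy with h1 | h1
        · exact absurd h1 hne
        · exact ⟨h1, hne⟩
    · have hvx : v < x := lt_of_le_of_ne hx (fun e => h e.symm)
      have hih := ih x hxs hxb
      have hadj : pvAdj (some v) (x :: xs) = x :: pvAdj (some x) xs := by
        simp [pvAdj, h]
      rw [hadj]
      refine ⟨?_, ?_, ?_⟩
      · exact List.pairwise_cons.mpr ⟨fun y hy => hih.2.1 y hy, hih.1⟩
      · intro y hy
        rcases List.mem_cons.mp hy with h1 | h1
        · exact h1 ▸ hvx
        · exact lt_trans hvx (hih.2.1 y h1)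
      · intro y
        rw [List.mem_cons, hih.2.2 y]
        constructor
        · rintro (rfl | ⟨hy, _⟩)
          · exact ⟨by simp, fun e => h e⟩
          · refine ⟨by simp [hy], ?_⟩
            have := hxb y hy
            omega
        · rintro ⟨hy, hne⟩
          rcases List.mem_cons.mp hy with rfl | h1
          · exact Or.inl rfl
          · by_cases hyx : y = x
            · exact Or.inl hyx
            · exact Or.inr ⟨h1, hyx⟩

lemma pvAdj_none (S : List Int) (hs : S.Pairwise (· ≤ ·)) :
    (pvAdj none S).Pairwise (· < ·) ∧ (∀ y, y ∈ pvAdj none S ↔ y ∈ S) := by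
  cases S with
  | nil => simp [pvAdj]
  | cons x xs =>
    have hxs : xs.Pairwise (· ≤ ·) := (List.pairwise_cons.mp hs).2
    have hxb : ∀ y ∈ xs, x ≤ y := (List.pairwise_cons.mp hs).1
    have hih := pvAdj_some xs x hxs hxb
    have hadj : pvAdj none (x :: xs) = x :: pvAdj (some x) xs := by simp [pvAdj]
    rw [hadj]
    refine ⟨List.pairwise_cons.mpr ⟨fun y hy => hih.2.1 y hy, hih.1⟩, fun y => ?_⟩
    rw [List.mem_cons, List.mem_cons, hih.2.2 y]
    constructor
    · rintro (rfl | ⟨hy, _⟩)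
      · exact Or.inl rfl
      · exact Or.inr hy
    · rintro (rfl | hy)
      · exact Or.inl rfl
      · by_cases hyx : y = x
        · exact Or.inl hyx
        · exact Or.inr ⟨hy, hyx⟩

-- A's dedupe fold: nodup, members = acc ∪ input
lemma pvDedupA (f : List Int) : ∀ (acc : List Int), acc.Nodup →
    (f.foldl (fun acc e => if e ∉ acc then acc ++ [e] else acc) acc).Nodup ∧
    (∀ y, y ∈ f.foldl (fun acc e => if e ∉ acc then acc ++ [e] else acc) acc ↔ y ∈ acc ∨ y ∈ f) := by
  induction f with
  | nil => intro acc h; simpa using h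
  | cons x xs ih =>
    intro acc h
    by_cases hx : x ∈ acc
    · have := ih acc h
      simp only [List.foldl, hx, not_true_eq_false, if_false]
      refine ⟨this.1, fun y => ?_⟩
      rw [this.2 y]
      constructor
      · rintro (hy | hy)
        · exact Or.inl hy
        · exact Or.inr (by simp [hy])
      · rintro (hy | hy)
        · exact Or.inl hy
        · rcases List.mem_cons.mp hy with rfl | h1
          · exact Or.inl hx
          · exact Or.inr h1
    · have hnd : (acc ++ [x]).Nodup := by
        rw [List.nodup_append]
        refine ⟨h, List.nodup_singleton x, ?_⟩
        intro a ha b hb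
        rw [List.mem_singleton] at hb
        subst hb
        exact fun e => hx (e ▸ ha)
      have := ih (acc ++ [x]) hnd
      simp only [List.foldl, hx, not_false_eq_true, if_true]
      refine ⟨this.1, fun y => ?_⟩
      rw [this.2 y]
      simp only [List.mem_append, List.mem_cons]
      tauto

theorem procesar_lista_spec : Claim_equal_procesar_lista := by
  intro l _
  unfold Spec_procesar_lista procesar_lista procesar_lista_alt
  set f := l.filter (fun num => decide (num ≥ 0)) with hf
  set S := PySem.List.sorted f (fun x => x) false with hS
  have hsorted : S.Pairwise (· ≤ ·) := PySem.List.sorted_pairwise f (fun x => x)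
  have hB := pvAdj_none S hsorted
  have hA := pvDedupA f [] (by simp)
  -- B's value is pvAdj none S
  have hBval : (S.foldl pvStep ([], none)).1 = pvAdj none S := by
    rw [pvFold_eq]; rfl
  -- the deduped lists are permutations
  have hperm : (pvAdj none S).Perm
      (f.foldl (fun acc e => if e ∉ acc then acc ++ [e] else acc) []) := by
    rw [List.perm_ext_iff_of_nodup hB.1.nodup hA.1]
    intro y
    rw [hB.2 y, (hA.2 y)]
    simp [hS, PySem.List.mem_sorted]
  have hmain := PySem.List.sorted_eq_of_perm_of_pairwise_lt
    (f.foldl (fun acc e => if e ∉ acc then acc ++ [e] else acc) [])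
    (pvAdj none S) (fun x => x) hperm hB.1
  show PySem.List.sorted _ _ false = (S.foldl pvStep ([], none)).1
  rw [hBval, hmain]

-- ===== VERDICT (by name: the statement is the Claim_ definition above) =====
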